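-- pv_equiv track=rewrite | github.com/p1x31/ctci-python | yandex/yandex_50289_ml/b_code.py | perform_segmentation
-- ===== SOURCE A (Python) =====
-- def perform_segmentation(matrix):
--     # Get the dimensions of the matrix
--     rows = len(matrix)
--     cols = len(matrix[0])
--
--     # Create a dictionary to store the mapping of segmented objects
--     objects = {}
--
--     # Perform segmentation
--     object_count = 0
--     for i in range(rows):
--         for j in range(cols):
--             if matrix[i][j] == 1:
--                 # Check the neighbors to determine if there's an existing object
--                 top = objects.get((i-1, j))
--                 left = objects.get((i, j-1))
--
--                 if top is None and left is None:
--                     # Create a new object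
--                     object_count += 1
--                     objects[(i, j)] = object_count
--                 elif top is not None and left is not None:
--                     # Merge two existing objects
--                     objects[(i, j)] = top
--                     if top != left:
--                         # Update the object mapping for objects connected horizontally
--                         for key, value in objects.items():
--                             if value == left:
--                                 objects[key] = top
--                 elif top is not None:
--                     # Assign the existing object from the top neighbor
--                     objects[(i, j)] = top
--                 else:
--                     # Assign the existing object from the left neighbor
--                     objects[(i, j)] = left
--
--     # Create the segmented matrix
--     segmented_matrix = [[objects.get((i, j), 0) for j in range(cols)] for i in range(rows)]
--
--     return object_count, segmented_matrix
-- ===== SOURCE B (Python) =====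
-- def perform_segmentation(matrix):
--     cols = len(matrix[0])
--     canon = [0]          # canon[l] = current canonical label of provisional label l; canon[0] = 0
--     count = 0
--     grid = []            # stored labels, built row by row (0 = background)
--     prev = [0] * cols
--     for src in matrix:
--         cur = []
--         for j in range(cols):
--             lab = 0
--             if src[j] == 1:
--                 top = canon[prev[j]]
--                 left = canon[cur[j - 1]] if j else 0
--                 if top == 0 and left == 0:
--                     count += 1
--                     canon.append(count)
--                     lab = count
--                 elif top and left:
--                     lab = top
--                     if top != left:
--                         canon = [top if c == left else c for c in canon]
--                 else:
--                     lab = top or left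
--             cur.append(lab)
--         grid.append(cur)
--         prev = cur
--     return count, [[canon[l] for l in row] for row in grid]
-- ===== Notes on version B (the rewrite author's own statement) =====
-- stated objective: alternative
-- what changed: Instead of a cell-keyed dict that is rescanned in full on every merge to relabel cells, B stores provisional labels in the grid (keeping only the previous row for neighbour lookups) and maintains a label->canonical table of size <= #labels; a merge remaps that small table once, and the final matrix is produced by mapping stored labels through the table.
import Mathlib
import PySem

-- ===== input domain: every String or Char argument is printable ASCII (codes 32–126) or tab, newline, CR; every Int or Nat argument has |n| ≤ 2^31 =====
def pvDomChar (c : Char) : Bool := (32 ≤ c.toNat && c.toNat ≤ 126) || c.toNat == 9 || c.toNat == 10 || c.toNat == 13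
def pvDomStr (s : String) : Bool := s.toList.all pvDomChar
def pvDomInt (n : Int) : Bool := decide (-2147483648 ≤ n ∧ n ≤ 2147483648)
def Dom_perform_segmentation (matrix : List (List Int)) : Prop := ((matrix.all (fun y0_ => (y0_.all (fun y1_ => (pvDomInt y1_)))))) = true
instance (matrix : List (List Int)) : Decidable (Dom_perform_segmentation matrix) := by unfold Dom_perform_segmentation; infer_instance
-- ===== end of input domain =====

-- B labels components in one pass keeping only the previous row and a label→canonical table that a merge remaps once, instead of A's cell-keyed dict rescanned in full on every merge.

-- ===== PORT A =====
-- one cell of A's scan: state = (objects dict keyed by (i, j), object_count)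
def pvA_step (matrix : List (List Int)) (st : PySem.Dict (Int × Int) Int × Int) (i j : Int) :
    PySem.Dict (Int × Int) Int × Int :=
  let objects := st.1
  let cnt := st.2
  if PySem.List.pyGetD (PySem.List.pyGetD matrix i []) j 0 = 1 then
    let top := objects.get? (i - 1, j)
    let left := objects.get? (i, j - 1)
    match top, left with
    | none, none => (objects.insert (i, j) (cnt + 1), cnt + 1)
    | some t, some l =>
      let objects := objects.insert (i, j) t
      if t ≠ l then
        -- for key, value in objects.items(): if value == left: objects[key] = top
        (objects.items.foldl (fun d kv => if kv.2 = l then d.insert kv.1 t else d) objects, cnt)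
      else (objects, cnt)
    | some t, none => (objects.insert (i, j) t, cnt)
    | none, some l => (objects.insert (i, j) l, cnt)
  else st

def perform_segmentation (matrix : List (List Int)) : Int × List (List Int) :=
  let rows : Int := PySem.List.len matrix
  let cols : Int := PySem.List.len (PySem.List.pyGetD matrix 0 [])   -- matrix[0]: Pre_ excludes []
  let st := (PySem.List.pyRange 0 rows 1).foldl (fun st i =>
      (PySem.List.pyRange 0 cols 1).foldl (fun st j => pvA_step matrix st i j) st)
    (PySem.Dict.empty, 0)
  (st.2, (PySem.List.pyRange 0 rows 1).map (fun i =>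
    (PySem.List.pyRange 0 cols 1).map (fun j => st.1.getD (i, j) 0)))

-- ===== PORT B =====
-- one cell of B's scan: state = (canon table, count, current row of stored labels)
def pvB_cell (src prev : List Int) (st : List Int × Int × List Int) (j : Int) :
    List Int × Int × List Int :=
  let canon := st.1
  let count := st.2.1
  let cur := st.2.2
  if PySem.List.pyGetD src j 0 = 1 then
    let top := PySem.List.pyGetD canon (PySem.List.pyGetD prev j 0) 0
    let left := if j ≠ 0 then PySem.List.pyGetD canon (PySem.List.pyGetD cur (j - 1) 0) 0 else 0
    if top = 0 ∧ left = 0 then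
      (canon ++ [count + 1], count + 1, cur ++ [count + 1])
    else if top ≠ 0 ∧ left ≠ 0 then
      let canon' := if top ≠ left then canon.map (fun c => if c = left then top else c) else canon
      (canon', count, cur ++ [top])
    else
      (canon, count, cur ++ [if top ≠ 0 then top else left])
  else (canon, count, cur ++ [0])

-- one row: state = (canon, count, grid built so far, previous row's stored labels)
def pvB_row (cols : Int) (st : List Int × Int × List (List Int) × List Int) (src : List Int) :
    List Int × Int × List (List Int) × List Int :=
  let r := (PySem.List.pyRange 0 cols 1).foldl (pvB_cell src st.2.2.2) (st.1, st.2.1, [])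
  (r.1, r.2.1, st.2.2.1 ++ [r.2.2], r.2.2)

def perform_segmentation_alt (matrix : List (List Int)) : Int × List (List Int) :=
  let cols : Int := PySem.List.len (PySem.List.pyGetD matrix 0 [])   -- matrix[0]: Pre_ excludes []
  let st := matrix.foldl (pvB_row cols) ([0], 0, [], List.replicate cols.toNat 0)
  (st.2.1, st.2.2.1.map (fun row => row.map (fun l => PySem.List.pyGetD st.1 l 0)))

-- ===== PRECONDITION & SPEC =====
-- Pre_ excludes exactly the inputs where the Pythons raise IndexError: the empty matrix
-- (matrix[0]) and matrices with a row shorter than row 0 (matrix[i][j] for j < cols).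
def Pre_perform_segmentation (matrix : List (List Int)) : Prop :=
  matrix ≠ [] ∧ ∀ row ∈ matrix, (matrix.headI).length ≤ row.length
instance (matrix : List (List Int)) : Decidable (Pre_perform_segmentation matrix) := by
  unfold Pre_perform_segmentation; infer_instance

def pvWitness_perform_segmentation : List (List Int) := [[1, 0, 1], [1, 1, 1]]

def Spec_perform_segmentation (matrix : List (List Int)) (out : Int × List (List Int)) : Prop :=
  out = perform_segmentation_alt matrix
instance (matrix : List (List Int)) (out : Int × List (List Int)) :
    Decidable (Spec_perform_segmentation matrix out) := by
  unfold Spec_perform_segmentation; infer_instance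

-- ===== CLAIM (what is proved, stated in full; the proofs are below) =====
def Claim_equal_perform_segmentation : Prop := ∀ (matrix : List (List Int)),
  Dom_perform_segmentation matrix → Pre_perform_segmentation matrix →
  Spec_perform_segmentation matrix (perform_segmentation matrix)

-- ===== LEMMAS AND PROOFS =====

def canonAt (canon : List Int) (l : Int) : Int := canon.getD l.toNat 0

def labAt (g : List (List Int)) (i j : Int) : Int :=
  if 0 ≤ i ∧ 0 ≤ j then (g.getD i.toNat []).getD j.toNat 0 else 0

-- the simulation invariant tying A's state (objects, cnt) to B's state (canon, cnt, grid g)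
def pvInv (objects : PySem.Dict (Int × Int) Int) (canon : List Int) (cnt : Int)
    (g : List (List Int)) : Prop :=
  objects.keys.Nodup ∧
  0 ≤ cnt ∧
  canon.length = cnt.toNat + 1 ∧
  canonAt canon 0 = 0 ∧
  (∀ l : Int, 1 ≤ l → l ≤ cnt → 1 ≤ canonAt canon l ∧ canonAt canon l ≤ cnt) ∧
  (∀ l : Int, 1 ≤ l → l ≤ cnt → canonAt canon (canonAt canon l) = canonAt canon l) ∧
  (∀ i j : Int, 0 ≤ labAt g i j ∧ labAt g i j ≤ cnt) ∧
  (∀ i j : Int, objects.get? (i, j) =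
    if labAt g i j = 0 then none else some (canonAt canon (labAt g i j)))

theorem pyGetD_int_nonneg {α} (xs : List α) (j : Int) (d : α) (hj : 0 ≤ j) :
    PySem.List.pyGetD xs j d = xs.getD j.toNat d := by
  rw [show j = ((j.toNat : Nat) : Int) by omega, PySem.List.pyGetD_natCast, Int.toNat_natCast]

theorem getD_append_lt {α} (xs ys : List α) (n : Nat) (d : α) (h : n < xs.length) :
    (xs ++ ys).getD n d = xs.getD n d := by
  simp [List.getD_eq_getElem?_getD, List.getElem?_append_left h]

theorem getD_append_len {α} (xs : List α) (y : α) (d : α) :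
    (xs ++ [y]).getD xs.length d = y := by
  simp [List.getD_eq_getElem?_getD]

theorem getD_big {α} (xs : List α) (n : Nat) (d : α) (h : xs.length ≤ n) :
    xs.getD n d = d := by
  simp [List.getD_eq_getElem?_getD, List.getElem?_eq_none_iff.mpr h]

theorem labAt_snoc_self (done : List (List Int)) (cur : List Int) (x : Int) :
    labAt (done ++ [cur ++ [x]]) (done.length : Int) (cur.length : Int) = x := by
  simp [labAt]

theorem labAt_last (done : List (List Int)) (cur : List Int) (j : Int) (hj : 0 ≤ j) :
    labAt (done ++ [cur]) (done.length : Int) j = cur.getD j.toNat 0 := by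
  simp [labAt, hj]

theorem labAt_prefix (done : List (List Int)) (cur : List Int) (i j : Int)
    (hi : i ≠ (done.length : Int)) :
    labAt (done ++ [cur]) i j = labAt done i j := by
  unfold labAt
  split
  · rename_i h
    rcases h with ⟨h0, _⟩
    rcases Nat.lt_or_ge i.toNat done.length with hlt | hge
    · rw [getD_append_lt _ _ _ _ hlt]
    · have hgt : done.length < i.toNat := by omega
      rw [getD_big done _ _ (by omega), getD_big (done ++ [cur]) _ _ (by simp; omega)]
  · rfl

theorem labAt_snoc_ne (done : List (List Int)) (cur : List Int) (x : Int) (i j : Int)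
    (h : ¬(i = (done.length : Int) ∧ j = (cur.length : Int))) :
    labAt (done ++ [cur ++ [x]]) i j = labAt (done ++ [cur]) i j := by
  by_cases hi : i = (done.length : Int)
  · subst hi
    have hj : j ≠ (cur.length : Int) := fun hj => h ⟨rfl, hj⟩
    unfold labAt
    split
    · rename_i hc
      rcases hc with ⟨_, hj0⟩
      rw [show ((done.length : Int)).toNat = done.length from by omega, getD_append_len, getD_append_len]
      have : j.toNat ≠ cur.length := by omega
      rcases Nat.lt_or_ge j.toNat cur.length with hlt | hge
      · rw [getD_append_lt _ _ _ _ hlt]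
      · rw [getD_big cur _ _ hge, getD_big (cur ++ [x]) _ _ (by simp; omega)]
    · rfl
  · rw [labAt_prefix _ _ _ _ hi, labAt_prefix _ _ _ _ hi]

theorem relabel_get? (l t : Int) (todo : List ((Int × Int) × Int))
    (e : PySem.Dict (Int × Int) Int) (k : Int × Int) :
    (todo.foldl (fun d kv => if kv.2 = l then d.insert kv.1 t else d) e).get? k =
      if (k, l) ∈ todo then some t else e.get? k := by
  induction todo generalizing e with
  | nil => simp
  | cons kv rest ih =>
    obtain ⟨k₀, v₀⟩ := kv
    simp only [List.foldl_cons]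
    by_cases hv : v₀ = l
    · subst hv
      simp only [if_true]
      rw [ih]
      by_cases hm : ((k, v₀) ∈ rest)
      · simp [hm]
      · simp only [if_neg hm]
        by_cases hk : k = k₀
        · subst hk
          simp [PySem.Dict.get?_insert_self]
        · rw [PySem.Dict.get?_insert_of_ne _ _ hk]
          rw [if_neg]
          simp only [List.mem_cons, not_or]
          exact ⟨by simp [Prod.ext_iff, hk], hm⟩
    · simp only [if_neg hv]
      rw [ih]
      have : ((k, l) ∈ (k₀, v₀) :: rest) ↔ ((k, l) ∈ rest) := by
        simp [List.mem_cons]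
        intro _ h; exact absurd h.symm hv
      rw [if_congr this rfl rfl]

theorem relabel_keys (l t : Int) (todo : List ((Int × Int) × Int))
    (e : PySem.Dict (Int × Int) Int) (hsub : ∀ kv ∈ todo, kv.1 ∈ e.keys) :
    (todo.foldl (fun d kv => if kv.2 = l then d.insert kv.1 t else d) e).keys = e.keys := by
  induction todo generalizing e with
  | nil => simp
  | cons kv rest ih =>
    obtain ⟨k₀, v₀⟩ := kv
    simp only [List.foldl_cons]
    by_cases hv : v₀ = l
    · simp only [if_pos hv]
      have hk : e.contains k₀ := (PySem.Dict.contains_iff_mem_keys _ _).mpr (hsub (k₀, v₀) (by simp))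
      rw [ih, PySem.Dict.keys_insert_of_contains _ _ hk]
      intro kv hkv
      rw [PySem.Dict.keys_insert_of_contains _ _ hk]
      exact hsub kv (by simp [hkv])
    · simp only [if_neg hv]
      exact ih e (fun kv hkv => hsub kv (by simp [hkv]))

theorem getD_map_lt (f : Int → Int) (xs : List Int) (n : Nat) (h : n < xs.length) :
    (xs.map f).getD n 0 = f (xs.getD n 0) := by
  simp [List.getD_eq_getElem?_getD, List.getElem?_map, List.getElem?_eq_getElem h]

theorem pvInv_congr (objects : PySem.Dict (Int × Int) Int) (canon : List Int) (cnt : Int)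
    (g g' : List (List Int)) (h : ∀ i j : Int, labAt g' i j = labAt g i j)
    (hInv : pvInv objects canon cnt g) : pvInv objects canon cnt g' := by
  obtain ⟨h1, h2, h3, h4, h5, h6, h7, h8⟩ := hInv
  exact ⟨h1, h2, h3, h4, h5, h6, fun i j => h i j ▸ h7 i j, fun i j => h i j ▸ h8 i j⟩

-- appending a background cell changes no labAt value
theorem labAt_snoc_zero (done : List (List Int)) (cur : List Int) (i j : Int) :
    labAt (done ++ [cur ++ [0]]) i j = labAt (done ++ [cur]) i j := by
  by_cases hp : i = (done.length : Int) ∧ j = (cur.length : Int)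
  · obtain ⟨hi, hj⟩ := hp; subst hi; subst hj
    rw [labAt_snoc_self, labAt_last _ _ _ (by positivity), Int.toNat_natCast,
      getD_big _ _ _ (le_refl _)]
  · exact labAt_snoc_ne _ _ _ _ _ hp

-- inserting a canonical label x at the next cell preserves the invariant
theorem pvInv_snoc (objects : PySem.Dict (Int × Int) Int) (canon : List Int) (cnt : Int)
    (done : List (List Int)) (cur : List Int) (x : Int)
    (hInv : pvInv objects canon cnt (done ++ [cur]))
    (hx0 : 1 ≤ x) (hxc : x ≤ cnt) (hfix : canonAt canon x = x) :
    pvInv (objects.insert ((done.length : Int), (cur.length : Int)) x) canon cnt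
      (done ++ [cur ++ [x]]) := by
  obtain ⟨h1, h2, h3, h4, h5, h6, h7, h8⟩ := hInv
  refine ⟨PySem.Dict.nodup_keys_insert _ _ _ h1, h2, h3, h4, h5, h6, ?_, ?_⟩
  · intro i j
    by_cases hp : i = (done.length : Int) ∧ j = (cur.length : Int)
    · obtain ⟨hi, hj⟩ := hp; subst hi; subst hj
      rw [labAt_snoc_self]; omega
    · rw [labAt_snoc_ne _ _ _ _ _ hp]; exact h7 i j
  · intro i j
    rw [PySem.Dict.get?_insert]
    by_cases hp : i = (done.length : Int) ∧ j = (cur.length : Int)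
    · obtain ⟨hi, hj⟩ := hp; subst hi; subst hj
      rw [if_pos rfl, labAt_snoc_self, if_neg (by omega), hfix]
    · rw [if_neg (by simp [Prod.ext_iff]; tauto), labAt_snoc_ne _ _ _ _ _ hp]
      exact h8 i j

-- creating a fresh label cnt+1 preserves the invariant
theorem pvInv_new (objects : PySem.Dict (Int × Int) Int) (canon : List Int) (cnt : Int)
    (done : List (List Int)) (cur : List Int)
    (hInv : pvInv objects canon cnt (done ++ [cur])) :
    pvInv (objects.insert ((done.length : Int), (cur.length : Int)) (cnt + 1))
      (canon ++ [cnt + 1]) (cnt + 1) (done ++ [cur ++ [cnt + 1]]) := by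
  obtain ⟨h1, h2, h3, h4, h5, h6, h7, h8⟩ := hInv
  have hat : ∀ l : Int, 0 ≤ l → l ≤ cnt → canonAt (canon ++ [cnt + 1]) l = canonAt canon l := by
    intro l hl0 hlc
    unfold canonAt
    exact getD_append_lt _ _ _ _ (by omega)
  have hnew : canonAt (canon ++ [cnt + 1]) (cnt + 1) = cnt + 1 := by
    unfold canonAt
    rw [show (cnt + 1).toNat = canon.length by omega, getD_append_len]
  refine ⟨PySem.Dict.nodup_keys_insert _ _ _ h1, by omega, by simp; omega, ?_, ?_, ?_, ?_, ?_⟩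
  · rw [hat 0 le_rfl h2]; exact h4
  · intro l hl1 hlc
    by_cases hl : l ≤ cnt
    · rw [hat l (by omega) hl]; have := h5 l hl1 hl; omega
    · have : l = cnt + 1 := by omega
      subst this; rw [hnew]; omega
  · intro l hl1 hlc
    by_cases hl : l ≤ cnt
    · rw [hat l (by omega) hl]
      have := h5 l hl1 hl
      rw [hat _ (by omega) (by omega), h6 l hl1 hl]
    · have : l = cnt + 1 := by omega
      subst this; rw [hnew, hnew]
  · intro i j
    by_cases hp : i = (done.length : Int) ∧ j = (cur.length : Int)
    · obtain ⟨hi, hj⟩ := hp; subst hi; subst hj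
      rw [labAt_snoc_self]; omega
    · rw [labAt_snoc_ne _ _ _ _ _ hp]; have := h7 i j; omega
  · intro i j
    rw [PySem.Dict.get?_insert]
    by_cases hp : i = (done.length : Int) ∧ j = (cur.length : Int)
    · obtain ⟨hi, hj⟩ := hp; subst hi; subst hj
      rw [if_pos rfl, labAt_snoc_self, if_neg (by omega), hnew]
    · rw [if_neg (by simp [Prod.ext_iff]; tauto), labAt_snoc_ne _ _ _ _ _ hp, h8 i j]
      by_cases hz : labAt (done ++ [cur]) i j = 0
      · simp [hz]
      · have := h7 i j
        rw [if_neg hz, if_neg hz, hat _ (by omega) (by omega)]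

-- merging left's class into top (A: rescan the whole dict; B: remap the canon table)
theorem pvInv_merge (objects : PySem.Dict (Int × Int) Int) (canon : List Int) (cnt : Int)
    (done : List (List Int)) (cur : List Int) (t l : Int)
    (hInv : pvInv objects canon cnt (done ++ [cur]))
    (ht1 : 1 ≤ t) (htc : t ≤ cnt) (hl1 : 1 ≤ l) (hlc : l ≤ cnt) (htl : t ≠ l)
    (hft : canonAt canon t = t) (hfl : canonAt canon l = l) :
    pvInv ((objects.insert ((done.length : Int), (cur.length : Int)) t).items.foldl
        (fun d kv => if kv.2 = l then d.insert kv.1 t else d)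
        (objects.insert ((done.length : Int), (cur.length : Int)) t))
      (canon.map (fun c => if c = l then t else c)) cnt (done ++ [cur ++ [t]]) := by
  obtain ⟨h1, h2, h3, h4, h5, h6, h7, h8⟩ := hInv
  set I : Int := (done.length : Int) with hI
  set J : Int := (cur.length : Int) with hJ
  set d := objects.insert (I, J) t with hd
  have hdnd : d.keys.Nodup := PySem.Dict.nodup_keys_insert _ _ _ h1
  have hkeys : (d.items.foldl (fun d kv => if kv.2 = l then d.insert kv.1 t else d) d).keys
      = d.keys :=
    relabel_keys _ _ _ _ (fun kv hkv => PySem.Dict.mem_keys_of_mem_items _ hkv)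
  have hget : ∀ k, (d.items.foldl (fun d kv => if kv.2 = l then d.insert kv.1 t else d) d).get? k
      = if d.get? k = some l then some t else d.get? k := by
    intro k
    rw [relabel_get?]
    by_cases hm : d.get? k = some l
    · rw [if_pos (PySem.Dict.mem_items_of_get?_eq_some _ hm), if_pos hm]
    · rw [if_neg (fun hmem => hm (PySem.Dict.get?_of_mem_items _ hmem hdnd)), if_neg hm]
  have hat : ∀ m : Int, 0 ≤ m → m ≤ cnt →
      canonAt (canon.map (fun c => if c = l then t else c)) m
        = if canonAt canon m = l then t else canonAt canon m := by
    intro m hm0 hmc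
    unfold canonAt
    exact getD_map_lt _ _ _ (by omega)
  refine ⟨hkeys ▸ hdnd, h2, by simp [h3], ?_, ?_, ?_, ?_, ?_⟩
  · rw [hat 0 le_rfl h2, h4, if_neg (by omega)]
  · intro m hm1 hmc
    rw [hat m (by omega) hmc]
    have := h5 m hm1 hmc
    split <;> omega
  · intro m hm1 hmc
    have hc := h5 m hm1 hmc
    rw [hat m (by omega) hmc]
    by_cases hcl : canonAt canon m = l
    · rw [if_pos hcl, hat t (by omega) htc, hft, if_neg htl]
    · rw [if_neg hcl, hat _ (by omega) (by omega), h6 m hm1 hmc, if_neg hcl]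
  · intro i j
    by_cases hp : i = I ∧ j = J
    · obtain ⟨hi, hj⟩ := hp; subst hi; subst hj
      rw [hI, hJ, labAt_snoc_self]; omega
    · rw [labAt_snoc_ne _ _ _ _ _ hp]; exact h7 i j
  · intro i j
    rw [hget]
    by_cases hp : i = I ∧ j = J
    · obtain ⟨hi, hj⟩ := hp; subst hi; subst hj
      have hdg : d.get? (I, J) = some t := by rw [hd]; exact PySem.Dict.get?_insert_self _ _ _
      rw [hdg, if_neg (by simp [htl]), hI, hJ, labAt_snoc_self, if_neg (by omega),
        hat t (by omega) htc, hft, if_neg htl]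
    · have hdg : d.get? (i, j) = objects.get? (i, j) := by
        rw [hd, PySem.Dict.get?_insert, if_neg (by simp only [Prod.mk.injEq]; tauto)]
      rw [hdg, h8 i j, labAt_snoc_ne _ _ _ _ _ hp]
      by_cases hz : labAt (done ++ [cur]) i j = 0
      · simp [hz]
      · have hb := h7 i j
        rw [if_neg hz, if_neg hz, hat _ (by omega) (by omega)]
        by_cases hcl : canonAt canon (labAt (done ++ [cur]) i j) = l
        · rw [if_pos (by rw [hcl]), if_pos hcl]
        · rw [if_neg (by simpa using hcl), if_neg hcl]


theorem labAt_append_nil (done : List (List Int)) (i j : Int) :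
    labAt (done ++ [[]]) i j = labAt done i j := by
  by_cases hi : i = (done.length : Int)
  · subst hi
    unfold labAt
    split
    · rw [Int.toNat_natCast, getD_append_len, getD_big done _ _ le_rfl]
    · rfl
  · exact labAt_prefix _ _ _ _ hi

theorem cell_sim (matrix : List (List Int)) (src prev : List Int) (done : List (List Int))
    (cur : List Int) (objects : PySem.Dict (Int × Int) Int) (canon : List Int) (cnt : Int)
    (hInv : pvInv objects canon cnt (done ++ [cur]))
    (hsrc : PySem.List.pyGetD matrix (done.length : Int) [] = src)
    (hprev : ∀ j : Int, 0 ≤ j → PySem.List.pyGetD prev j 0 =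
      labAt (done ++ [cur]) ((done.length : Int) - 1) j) :
    ∃ x : Int,
      pvB_cell src prev (canon, cnt, cur) (cur.length : Int) =
        ((pvB_cell src prev (canon, cnt, cur) (cur.length : Int)).1,
         (pvA_step matrix (objects, cnt) (done.length : Int) (cur.length : Int)).2,
         cur ++ [x]) ∧
      pvInv (pvA_step matrix (objects, cnt) (done.length : Int) (cur.length : Int)).1
        (pvB_cell src prev (canon, cnt, cur) (cur.length : Int)).1
        (pvA_step matrix (objects, cnt) (done.length : Int) (cur.length : Int)).2
        (done ++ [cur ++ [x]]) := by
  have hInv' := hInv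
  obtain ⟨h1, h2, h3, h4, h5, h6, h7, h8⟩ := hInv'
  set I : Int := (done.length : Int) with hI
  set J : Int := (cur.length : Int) with hJ
  have hJ0 : 0 ≤ J := by positivity
  set pl := labAt (done ++ [cur]) (I - 1) J with hpl_def
  have hplb := h7 (I - 1) J
  have htopB : PySem.List.pyGetD canon (PySem.List.pyGetD prev J 0) 0 = canonAt canon pl := by
    rw [hprev J hJ0, ← hpl_def, pyGetD_int_nonneg _ _ _ hplb.1]; rfl
  set ll := labAt (done ++ [cur]) I (J - 1) with hll_def
  have hllb := h7 I (J - 1)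
  have hleftB : (if J ≠ 0 then PySem.List.pyGetD canon (PySem.List.pyGetD cur (J - 1) 0) 0 else 0)
      = canonAt canon ll := by
    by_cases hJz : J = 0
    · rw [if_neg (by simp [hJz])]
      have hz : ll = 0 := by
        rw [hll_def]; unfold labAt; rw [if_neg (by omega)]
      rw [hz, h4]
    · rw [if_pos hJz, pyGetD_int_nonneg cur (J - 1) 0 (by omega)]
      have hce : cur.getD (J - 1).toNat 0 = ll := by
        rw [hll_def]; exact (labAt_last done cur (J - 1) (by omega)).symm
      rw [hce, pyGetD_int_nonneg canon ll 0 hllb.1]; rfl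
  have htopA : objects.get? (I - 1, J) = if pl = 0 then none else some (canonAt canon pl) :=
    h8 (I - 1) J
  have hleftA : objects.get? (I, J - 1) = if ll = 0 then none else some (canonAt canon ll) :=
    h8 I (J - 1)
  have hct0 : canonAt canon pl = 0 ↔ pl = 0 := by
    by_cases hz : pl = 0
    · simp [hz, h4]
    · have := h5 pl (by omega) hplb.2
      constructor <;> intro <;> omega
  have hcl0 : canonAt canon ll = 0 ↔ ll = 0 := by
    by_cases hz : ll = 0
    · simp [hz, h4]
    · have := h5 ll (by omega) hllb.2
      constructor <;> intro <;> omega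
  by_cases hval : PySem.List.pyGetD src J 0 = 1
  · have hBtest : pvB_cell src prev (canon, cnt, cur) J =
        (if canonAt canon pl = 0 ∧ canonAt canon ll = 0 then
          (canon ++ [cnt + 1], cnt + 1, cur ++ [cnt + 1])
        else if canonAt canon pl ≠ 0 ∧ canonAt canon ll ≠ 0 then
          (if canonAt canon pl ≠ canonAt canon ll then
              canon.map (fun c => if c = canonAt canon ll then canonAt canon pl else c)
            else canon, cnt,
           cur ++ [canonAt canon pl])
        else (canon, cnt, cur ++ [if canonAt canon pl ≠ 0 then canonAt canon pl
          else canonAt canon ll])) := by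
      simp only [pvB_cell, if_pos hval, htopB, hleftB]
    have hAtest : pvA_step matrix (objects, cnt) I J =
        (match (if pl = 0 then none else some (canonAt canon pl) : Option Int),
              (if ll = 0 then none else some (canonAt canon ll) : Option Int) with
        | none, none => (objects.insert (I, J) (cnt + 1), cnt + 1)
        | some t, some l =>
          if t ≠ l then
            (((objects.insert (I, J) t).items.foldl
                (fun d kv => if kv.2 = l then d.insert kv.1 t else d)
                (objects.insert (I, J) t)), cnt)
          else (objects.insert (I, J) t, cnt)
        | some t, none => (objects.insert (I, J) t, cnt)
        | none, some l => (objects.insert (I, J) l, cnt)) := by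
      simp only [pvA_step, hsrc, if_pos hval, htopA, hleftA]
    by_cases hplz : pl = 0 <;> by_cases hllz : ll = 0
    · -- no neighbours: fresh label
      have hA : pvA_step matrix (objects, cnt) I J = (objects.insert (I, J) (cnt + 1), cnt + 1) :=
        hAtest.trans (by rw [if_pos hplz, if_pos hllz])
      have hB : pvB_cell src prev (canon, cnt, cur) J =
          (canon ++ [cnt + 1], cnt + 1, cur ++ [cnt + 1]) :=
        hBtest.trans (by rw [if_pos ⟨hct0.mpr hplz, hcl0.mpr hllz⟩])
      refine ⟨cnt + 1, ?_, ?_⟩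
      · rw [hA, hB]
      · rw [hA, hB]
        exact pvInv_new objects canon cnt done cur hInv
    · -- only left neighbour
      have hclb := h5 ll (by omega) hllb.2
      have hA : pvA_step matrix (objects, cnt) I J =
          (objects.insert (I, J) (canonAt canon ll), cnt) :=
        hAtest.trans (by rw [if_pos hplz, if_neg hllz])
      have hB : pvB_cell src prev (canon, cnt, cur) J =
          (canon, cnt, cur ++ [canonAt canon ll]) := by
        refine hBtest.trans ?_
        rw [if_neg (by simp only [ne_eq, hct0, hcl0] <;> tauto), if_neg (by simp only [ne_eq, hct0, hcl0] <;> tauto),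
          if_neg (by simp only [ne_eq, hct0, hcl0] <;> tauto)]
      refine ⟨canonAt canon ll, ?_, ?_⟩
      · rw [hA, hB]
      · rw [hA, hB]
        exact pvInv_snoc objects canon cnt done cur _ hInv (by omega) hclb.2
          (h6 ll (by omega) hllb.2)
    · -- only top neighbour
      have hctb := h5 pl (by omega) hplb.2
      have hA : pvA_step matrix (objects, cnt) I J =
          (objects.insert (I, J) (canonAt canon pl), cnt) :=
        hAtest.trans (by rw [if_neg hplz, if_pos hllz])
      have hB : pvB_cell src prev (canon, cnt, cur) J =
          (canon, cnt, cur ++ [canonAt canon pl]) := by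
        refine hBtest.trans ?_
        rw [if_neg (by simp only [ne_eq, hct0, hcl0] <;> tauto), if_neg (by simp only [ne_eq, hct0, hcl0] <;> tauto),
          if_pos (by simp only [ne_eq, hct0, hcl0] <;> tauto)]
      refine ⟨canonAt canon pl, ?_, ?_⟩
      · rw [hA, hB]
      · rw [hA, hB]
        exact pvInv_snoc objects canon cnt done cur _ hInv (by omega) hctb.2
          (h6 pl (by omega) hplb.2)
    · -- both neighbours
      have hctb := h5 pl (by omega) hplb.2
      have hclb := h5 ll (by omega) hllb.2
      have hfixt := h6 pl (by omega) hplb.2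
      have hfixl := h6 ll (by omega) hllb.2
      by_cases heq : canonAt canon pl = canonAt canon ll
      · -- same object: plain insert
        have hA : pvA_step matrix (objects, cnt) I J =
            (objects.insert (I, J) (canonAt canon pl), cnt) :=
          hAtest.trans (by rw [if_neg hplz, if_neg hllz]; simp [heq])
        have hB : pvB_cell src prev (canon, cnt, cur) J =
            (canon, cnt, cur ++ [canonAt canon pl]) := by
          refine hBtest.trans ?_
          rw [if_neg (by simp only [ne_eq, hct0, hcl0] <;> tauto), if_pos ⟨by simp only [ne_eq, hct0, hcl0] <;> tauto, by simp only [ne_eq, hct0, hcl0] <;> tauto⟩,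
            if_neg (by simpa using heq)]
        refine ⟨canonAt canon pl, ?_, ?_⟩
        · rw [hA, hB]
        · rw [hA, hB]
          exact pvInv_snoc objects canon cnt done cur _ hInv (by omega) hctb.2 hfixt
      · -- merge: A rescans the dict, B remaps the canon table
        have hA : pvA_step matrix (objects, cnt) I J =
            (((objects.insert (I, J) (canonAt canon pl)).items.foldl
                (fun d kv => if kv.2 = canonAt canon ll then d.insert kv.1 (canonAt canon pl)
                  else d)
                (objects.insert (I, J) (canonAt canon pl))), cnt) :=
          hAtest.trans (by rw [if_neg hplz, if_neg hllz]; simp [heq])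
        have hB : pvB_cell src prev (canon, cnt, cur) J =
            (canon.map (fun c => if c = canonAt canon ll then canonAt canon pl else c), cnt,
             cur ++ [canonAt canon pl]) := by
          refine hBtest.trans ?_
          rw [if_neg (by simp only [ne_eq, hct0, hcl0] <;> tauto), if_pos ⟨by simp only [ne_eq, hct0, hcl0] <;> tauto, by simp only [ne_eq, hct0, hcl0] <;> tauto⟩,
            if_pos (by simpa using heq)]
        refine ⟨canonAt canon pl, ?_, ?_⟩
        · rw [hA, hB]
        · rw [hA, hB]
          exact pvInv_merge objects canon cnt done cur _ _ hInv (by omega) hctb.2 (by omega)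
            hclb.2 heq hfixt hfixl
  · refine ⟨0, ?_, ?_⟩
    · simp only [pvB_cell, pvA_step, hsrc, if_neg hval]
    · simp only [pvB_cell, pvA_step, hsrc, if_neg hval]
      exact pvInv_congr _ _ _ _ _ (labAt_snoc_zero done cur) hInv


theorem inner_sim (fuel : Nat) : ∀ (cols : Int) (matrix : List (List Int)) (src prev : List Int)
    (done : List (List Int)) (cur : List Int) (objects : PySem.Dict (Int × Int) Int)
    (canon : List Int) (cnt : Int),
    (cols - (cur.length : Int)).toNat = fuel →
    pvInv objects canon cnt (done ++ [cur]) →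
    PySem.List.pyGetD matrix (done.length : Int) [] = src →
    (∀ j : Int, 0 ≤ j → PySem.List.pyGetD prev j 0 =
      labAt (done ++ [cur]) ((done.length : Int) - 1) j) →
    (PySem.List.pyRange (cur.length : Int) cols 1).foldl
        (fun st j => pvA_step matrix st (done.length : Int) j) (objects, cnt) =
      (((PySem.List.pyRange (cur.length : Int) cols 1).foldl
          (fun st j => pvA_step matrix st (done.length : Int) j) (objects, cnt)).1,
       ((PySem.List.pyRange (cur.length : Int) cols 1).foldl (pvB_cell src prev)
          (canon, cnt, cur)).2.1) ∧
    pvInv ((PySem.List.pyRange (cur.length : Int) cols 1).foldl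
        (fun st j => pvA_step matrix st (done.length : Int) j) (objects, cnt)).1
      ((PySem.List.pyRange (cur.length : Int) cols 1).foldl (pvB_cell src prev)
        (canon, cnt, cur)).1
      ((PySem.List.pyRange (cur.length : Int) cols 1).foldl (pvB_cell src prev)
        (canon, cnt, cur)).2.1
      (done ++ [((PySem.List.pyRange (cur.length : Int) cols 1).foldl (pvB_cell src prev)
        (canon, cnt, cur)).2.2]) ∧
    ((PySem.List.pyRange (cur.length : Int) cols 1).foldl (pvB_cell src prev)
        (canon, cnt, cur)).2.2.length = cur.length + fuel := by
  induction fuel with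
  | zero =>
    intro cols matrix src prev done cur objects canon cnt hf hInv hsrc hprev
    rw [PySem.List.pyRange_one_eq_nil (by omega)]
    simp only [List.foldl_nil]
    exact ⟨trivial, hInv, by omega⟩
  | succ n ih =>
    intro cols matrix src prev done cur objects canon cnt hf hInv hsrc hprev
    have hlt : ((cur.length : Int)) < cols := by omega
    rw [PySem.List.pyRange_one_cons hlt]
    simp only [List.foldl_cons]
    obtain ⟨x, hBx, hInv'⟩ := cell_sim matrix src prev done cur objects canon cnt hInv hsrc hprev
    rw [hBx]
    have hprev' : ∀ j : Int, 0 ≤ j → PySem.List.pyGetD prev j 0 =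
        labAt (done ++ [cur ++ [x]]) ((done.length : Int) - 1) j := by
      intro j hj
      rw [hprev j hj, labAt_prefix _ _ _ _ (by omega), labAt_prefix _ _ _ _ (by omega)]
    have ihh := ih cols matrix src prev done (cur ++ [x])
      (pvA_step matrix (objects, cnt) (done.length : Int) (cur.length : Int)).1
      (pvB_cell src prev (canon, cnt, cur) (cur.length : Int)).1
      (pvA_step matrix (objects, cnt) (done.length : Int) (cur.length : Int)).2
      (by simp; omega) hInv' hsrc hprev'
    have hlen1 : (((cur ++ [x]).length : Nat) : Int) = (cur.length : Int) + 1 := by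
      simp
    rw [hlen1] at ihh
    refine ⟨ihh.1, ihh.2.1, ?_⟩
    have := ihh.2.2
    simp only [List.length_append, List.length_cons, List.length_nil] at this ⊢
    omega

theorem outer_sim (rs : List (List Int)) : ∀ (matrix : List (List Int)) (cols : Int)
    (done : List (List Int)) (objects : PySem.Dict (Int × Int) Int) (canon : List Int)
    (cnt : Int) (prev : List Int),
    matrix.drop done.length = rs →
    pvInv objects canon cnt done →
    (∀ j : Int, 0 ≤ j → PySem.List.pyGetD prev j 0 =
      labAt done ((done.length : Int) - 1) j) →
    (∀ row ∈ done, row.length = cols.toNat) →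
    0 ≤ cols →
    ((PySem.List.pyRange (done.length : Int) (matrix.length : Int) 1).foldl
        (fun st i => (PySem.List.pyRange 0 cols 1).foldl
          (fun st j => pvA_step matrix st i j) st) (objects, cnt)).2 =
      (rs.foldl (pvB_row cols) (canon, cnt, done, prev)).2.1 ∧
    pvInv ((PySem.List.pyRange (done.length : Int) (matrix.length : Int) 1).foldl
        (fun st i => (PySem.List.pyRange 0 cols 1).foldl
          (fun st j => pvA_step matrix st i j) st) (objects, cnt)).1
      (rs.foldl (pvB_row cols) (canon, cnt, done, prev)).1
      ((PySem.List.pyRange (done.length : Int) (matrix.length : Int) 1).foldl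
        (fun st i => (PySem.List.pyRange 0 cols 1).foldl
          (fun st j => pvA_step matrix st i j) st) (objects, cnt)).2
      (rs.foldl (pvB_row cols) (canon, cnt, done, prev)).2.2.1 ∧
    (rs.foldl (pvB_row cols) (canon, cnt, done, prev)).2.2.1.length
      = done.length + rs.length ∧
    (∀ row ∈ (rs.foldl (pvB_row cols) (canon, cnt, done, prev)).2.2.1,
      row.length = cols.toNat) := by
  induction rs with
  | nil =>
    intro matrix cols done objects canon cnt prev hdrop hInv hprev hrows hc0
    have hle : matrix.length ≤ done.length := by
      rw [← List.drop_eq_nil_iff]; exact hdrop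
    rw [PySem.List.pyRange_one_eq_nil
      (show (matrix.length : Int) ≤ (done.length : Int) from by exact_mod_cast hle)]
    simp only [List.foldl_nil]
    exact ⟨trivial, hInv, by simp, hrows⟩
  | cons src rs' ih =>
    intro matrix cols done objects canon cnt prev hdrop hInv hprev hrows hc0
    have hlen' := congrArg List.length hdrop
    simp only [List.length_drop, List.length_cons] at hlen'
    have hlt : done.length < matrix.length := by omega
    have hsrc0 : matrix[done.length]? = some src := by
      have h0 : (matrix.drop done.length)[0]? = some src := by rw [hdrop]; rfl
      rwa [List.getElem?_drop, Nat.add_zero] at h0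
    have hsrc : PySem.List.pyGetD matrix (done.length : Int) [] = src := by
      rw [pyGetD_int_nonneg _ _ _ (by positivity), Int.toNat_natCast,
        List.getD_eq_getElem?_getD, hsrc0]
      rfl
    rw [PySem.List.pyRange_one_cons
      (show ((done.length : Int)) < (matrix.length : Int) from by exact_mod_cast hlt)]
    simp only [List.foldl_cons, pvB_row]
    have hInv0 : pvInv objects canon cnt (done ++ [[]]) :=
      pvInv_congr _ _ _ done _ (fun i j => labAt_append_nil done i j) hInv
    have hprev0 : ∀ j : Int, 0 ≤ j → PySem.List.pyGetD prev j 0 =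
        labAt (done ++ [[]]) ((done.length : Int) - 1) j := by
      intro j hj
      rw [labAt_append_nil]; exact hprev j hj
    have ihh := inner_sim cols.toNat cols matrix src prev done [] objects canon cnt
      (by simp) hInv0 hsrc hprev0
    simp only [List.length_nil, Nat.cast_zero, Nat.zero_add] at ihh
    obtain ⟨hc, hI2, hlen⟩ := ihh
    rw [hc]
    have hprev' : ∀ j : Int, 0 ≤ j →
        PySem.List.pyGetD ((PySem.List.pyRange 0 cols 1).foldl (pvB_cell src prev)
          (canon, cnt, [])).2.2 j 0 =
        labAt (done ++ [((PySem.List.pyRange 0 cols 1).foldl (pvB_cell src prev)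
          (canon, cnt, [])).2.2])
          (((done ++ [((PySem.List.pyRange 0 cols 1).foldl (pvB_cell src prev)
            (canon, cnt, [])).2.2]).length : Int) - 1) j := by
      intro j hj
      have he : ((done ++ [((PySem.List.pyRange 0 cols 1).foldl (pvB_cell src prev)
          (canon, cnt, [])).2.2]).length : Int) - 1 = (done.length : Int) := by
        simp
      rw [he, labAt_last _ _ _ hj, pyGetD_int_nonneg _ _ _ hj]
    have hdrop' : matrix.drop (done ++ [((PySem.List.pyRange 0 cols 1).foldl
        (pvB_cell src prev) (canon, cnt, [])).2.2]).length = rs' := by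
      simp only [List.length_append, List.length_cons, List.length_nil]
      have : matrix.drop (done.length + 1) = (matrix.drop done.length).drop 1 := by
        rw [List.drop_drop, Nat.add_comm]
      rw [this, hdrop, List.drop_one, List.tail_cons]
    have hrows' : ∀ row ∈ done ++ [((PySem.List.pyRange 0 cols 1).foldl
        (pvB_cell src prev) (canon, cnt, [])).2.2], row.length = cols.toNat := by
      intro row hrow
      rcases List.mem_append.mp hrow with h | h
      · exact hrows row h
      · simp only [List.mem_singleton] at h
        rw [h, hlen]
    have ihh2 := ih matrix cols
      (done ++ [((PySem.List.pyRange 0 cols 1).foldl (pvB_cell src prev) (canon, cnt, [])).2.2])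
      ((PySem.List.pyRange 0 cols 1).foldl
        (fun st j => pvA_step matrix st (done.length : Int) j) (objects, cnt)).1
      ((PySem.List.pyRange 0 cols 1).foldl (pvB_cell src prev) (canon, cnt, [])).1
      ((PySem.List.pyRange 0 cols 1).foldl (pvB_cell src prev) (canon, cnt, [])).2.1
      ((PySem.List.pyRange 0 cols 1).foldl (pvB_cell src prev) (canon, cnt, [])).2.2
      hdrop' hI2 hprev' hrows' hc0
    have hlen2 : ((done ++ [((PySem.List.pyRange 0 cols 1).foldl (pvB_cell src prev)
        (canon, cnt, [])).2.2]).length : Int) = ((done.length : Int) + 1) := by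
      simp
    rw [hlen2] at ihh2
    refine ⟨ihh2.1, ihh2.2.1, ?_, ihh2.2.2.2⟩
    have := ihh2.2.2.1
    simp only [List.length_append, List.length_cons, List.length_nil] at this ⊢
    omega

-- ===== VERDICT (by name: the statement is the Claim_ definition above) =====
theorem labAt_getElem (g : List (List Int)) (i j : Nat) (hi : i < g.length)
    (hj : j < g[i].length) : labAt g (i : Int) (j : Int) = g[i][j] := by
  unfold labAt
  rw [if_pos ⟨by positivity, by positivity⟩, Int.toNat_natCast, Int.toNat_natCast]
  simp only [List.getD_eq_getElem?_getD, List.getElem?_eq_getElem hi, Option.getD_some,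
    List.getElem?_eq_getElem hj]

theorem pvInv_init : pvInv (PySem.Dict.empty : PySem.Dict (Int × Int) Int) [0] 0 [] := by
  refine ⟨PySem.Dict.nodup_keys_empty, le_refl 0, rfl, rfl, ?_, ?_, ?_, ?_⟩
  · intro l hl1 hl2; omega
  · intro l hl1 hl2; omega
  · intro i j
    unfold labAt
    split <;> simp
  · intro i j
    rw [PySem.Dict.get?_empty]
    have hz : labAt [] i j = 0 := by unfold labAt; split <;> simp
    rw [hz, if_pos rfl]

theorem perform_segmentation_spec : Claim_equal_perform_segmentation := by
  intro matrix hdom hpre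
  unfold Spec_perform_segmentation perform_segmentation perform_segmentation_alt
  simp only [PySem.List.len_eq]
  set cols : Int := ((PySem.List.pyGetD matrix 0 []).length : Int) with hcols
  have hc0 : 0 ≤ cols := by rw [hcols]; positivity
  have hrep : ∀ j : Int, 0 ≤ j →
      PySem.List.pyGetD (List.replicate cols.toNat (0 : Int)) j 0 = 0 := by
    intro j hj
    rw [pyGetD_int_nonneg _ _ _ hj, List.getD_eq_getElem?_getD, List.getElem?_replicate]
    split <;> rfl
  have hprev0 : ∀ j : Int, 0 ≤ j → PySem.List.pyGetD (List.replicate cols.toNat (0 : Int)) j 0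
      = labAt [] ((([] : List (List Int)).length : Int) - 1) j := by
    intro j hj
    rw [hrep j hj]
    unfold labAt
    rw [if_neg (by simp)]
  have H := outer_sim matrix matrix cols [] PySem.Dict.empty [0] 0
    (List.replicate cols.toNat 0) (by simp) pvInv_init hprev0 (by simp) hc0
  simp only [List.length_nil, Nat.cast_zero] at H
  obtain ⟨Hc, HInv, Hlen, Hrows⟩ := H
  obtain ⟨h1, h2, h3, h4, h5, h6, h7, h8⟩ := HInv
  rw [Prod.mk.injEq]
  refine ⟨Hc, ?_⟩
  apply List.ext_getElem
  · simp only [List.length_map, PySem.List.length_pyRange_one, Hlen]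
    omega
  · intro i hi1 hi2
    have higF : i < (matrix.foldl (pvB_row cols)
        ([0], 0, [], List.replicate cols.toNat 0)).2.2.1.length := by
      simp only [List.length_map] at hi2; exact hi2
    simp only [List.getElem_map, PySem.List.getElem_pyRange_one, zero_add]
    apply List.ext_getElem
    · simp only [List.length_map, PySem.List.length_pyRange_one]
      rw [Hrows _ (List.getElem_mem higF)]
      omega
    · intro j hj1 hj2
      simp only [List.getElem_map, PySem.List.getElem_pyRange_one, zero_add]
      rw [PySem.Dict.getD_eq_get?_getD, h8]
      have hjlt : j < ((matrix.foldl (pvB_row cols)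
          ([0], 0, [], List.replicate cols.toNat 0)).2.2.1[i]).length := by
        simp only [List.length_map] at hj2; exact hj2
      have hlab := labAt_getElem _ i j higF hjlt
      rw [hlab]
      have hbnd := h7 (i : Int) (j : Int)
      rw [hlab] at hbnd
      rw [pyGetD_int_nonneg _ _ _ hbnd.1]
      by_cases hz : (matrix.foldl (pvB_row cols)
          ([0], 0, [], List.replicate cols.toNat 0)).2.2.1[i][j] = 0
      · rw [if_pos hz, hz]
        have h40 := h4
        unfold canonAt at h40
        simp only [Int.toNat_zero] at h40 ⊢
        rw [h40]
        rfl
      · rw [if_neg hz]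
        rfl
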